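-- pv_equiv track=rewrite | github.com/miguel-dev01/python_sge | pruebas_examenes/matriz3/recorte.py | recortes
-- ===== SOURCE A (Python) =====
-- def recortes(matriz):
--     recorte = int()
--     n_filas = len(matriz)
--     longitud_columnas = float('inf')
--     for fila in matriz:
--         n_columnas = len(fila)
--         if n_columnas < longitud_columnas:
--             longitud_columnas = n_columnas
--
--     if n_filas < longitud_columnas:
--         recorte = n_filas
--     else:
--         recorte = longitud_columnas
--
--     matriz_recorte = []
--     matriz_sobrante = []
--     for fila in matriz[:recorte]:
--         matriz_ = []
--         for columna in fila[:recorte]: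
--             matriz_.append(columna)
--             if columna in fila:
--                 fila.remove(columna)
--         matriz_recorte.append(matriz_)
--
--     matriz_sobrante = [fila for fila in matriz if fila]
--     return tuple([matriz_recorte]) + tuple([matriz_sobrante])
-- ===== SOURCE B (Python) =====
-- # B: since fila[:recorte] is literally fila's prefix, A's element-by-element
-- # remove of each prefix value strips exactly the first `recorte` elements;
-- # so compute everything with slices. Mutates the first `recorte` rows in
-- # place (fila[:] = fila[recorte:]) exactly as A does.
-- def recortes(matriz):
--     recorte = min([len(matriz)] + [len(fila) for fila in matriz])
--     matriz_recorte = [fila[:recorte] for fila in matriz[:recorte]]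
--     for fila in matriz[:recorte]:
--         fila[:] = fila[recorte:]
--     return (matriz_recorte, [fila for fila in matriz if fila])
-- ===== Notes on version B (the rewrite author's own statement) =====
-- stated objective: simpler
-- what changed: A computes the cut size with a manual min-tracking loop and strips each processed row by repeatedly calling list.remove for every element of its own prefix; B computes recorte with a single min() call and replaces the whole remove loop by plain slicing (row[:recorte] kept, row[:] = row[recorte:] leftover), since the removed values are exactly the row's first recorte elements.
import Mathlib
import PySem

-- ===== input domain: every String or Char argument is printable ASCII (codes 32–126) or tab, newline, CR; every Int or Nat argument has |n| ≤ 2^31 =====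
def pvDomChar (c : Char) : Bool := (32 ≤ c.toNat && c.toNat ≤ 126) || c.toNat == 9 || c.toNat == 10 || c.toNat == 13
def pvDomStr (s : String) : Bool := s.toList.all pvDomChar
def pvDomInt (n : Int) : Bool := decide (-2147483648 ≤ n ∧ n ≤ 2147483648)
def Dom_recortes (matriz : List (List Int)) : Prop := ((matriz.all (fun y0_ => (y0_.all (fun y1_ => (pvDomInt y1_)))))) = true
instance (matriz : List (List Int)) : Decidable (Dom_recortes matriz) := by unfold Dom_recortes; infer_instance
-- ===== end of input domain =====

-- B replaces A's element-by-element remove loop (which strips exactly the row's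
-- first `recorte` elements, since the removed values are the row's own prefix)
-- by plain slicing: simpler and one pass. Python B performs the same in-place
-- row mutation as A (fila[:] = fila[recorte:]); the theorems are about the
-- return value.


-- ===== PORT A =====
-- inner loop: 'for columna in fila[:recorte]: matriz_.append(columna); if columna in fila: fila.remove(columna)'
-- (state = (matriz_, fila); fila is mutated in place)
def pvInnerA (pref fila : List Int) : List Int × List Int :=
  pref.foldl
    (fun st columna =>
      (st.1 ++ [columna],
       if columna ∈ st.2 then (PySem.List.remove? st.2 columna).getD st.2 else st.2))
    ([], fila)

-- outer loop: 'for fila in matriz[:recorte]' — processes the first k rows (k = recorte),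
-- threading the in-place mutation of those rows through the matrix; returns
-- (matriz_recorte, the mutated matriz)
def pvOuterA (recorte : Int) (k : Nat) (rows : List (List Int)) : List (List Int) × List (List Int) :=
  match k, rows with
  | 0, rest => ([], rest)
  | _ + 1, [] => ([], [])
  | k + 1, fila :: rest =>
    let st := pvInnerA (PySem.List.slice fila none (some recorte)) fila
    let res := pvOuterA recorte k rest
    (st.1 :: res.1, st.2 :: res.2)

def recortes (matriz : List (List Int)) : List (List Int) × List (List Int) :=
  let n_filas : Int := matriz.length
  -- longitud_columnas = float('inf') modeled as `none` (anything < inf, so the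
  -- first row always replaces it — exact for the comparisons A performs)
  let longitud_columnas : Option Int :=
    matriz.foldl
      (fun lc fila =>
        match lc with
        | none => some (fila.length : Int)
        | some v => if (fila.length : Int) < v then some (fila.length : Int) else some v)
      none
  let recorte : Int :=
    match longitud_columnas with
    | none => n_filas            -- n_filas < float('inf')
    | some v => if n_filas < v then n_filas else v
  let st := pvOuterA recorte recorte.toNat matriz
  (st.1, st.2.filter (fun fila => !fila.isEmpty))

-- ===== PORT B =====
def recortes_alt (matriz : List (List Int)) : List (List Int) × List (List Int) :=
  -- min([len(matriz)] + [len(fila) for fila in matriz]) — the list is non-empty, so min? = some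
  let recorte : Int :=
    (PySem.List.min? ((matriz.length : Int) :: matriz.map (fun fila => (fila.length : Int))) id).getD 0
  let matriz_recorte :=
    (PySem.List.slice matriz none (some recorte)).map
      (fun fila => PySem.List.slice fila none (some recorte))
  -- 'for fila in matriz[:recorte]: fila[:] = fila[recorte:]' — the mutated matrix
  let matriz' :=
    (PySem.List.slice matriz none (some recorte)).map
      (fun fila => PySem.List.slice fila (some recorte) none)
    ++ PySem.List.slice matriz (some recorte) none
  (matriz_recorte, matriz'.filter (fun fila => !fila.isEmpty))

-- ===== PRECONDITION & SPEC =====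
def Spec_recortes (matriz : List (List Int)) (out : List (List Int) × List (List Int)) : Prop := out = recortes_alt matriz
instance (matriz : List (List Int)) (out : List (List Int) × List (List Int)) : Decidable (Spec_recortes matriz out) := by unfold Spec_recortes; infer_instance

-- ===== CLAIM (what is proved, stated in full; the proofs are below) =====
def Claim_equal_recortes : Prop := ∀ (matriz : List (List Int)), Dom_recortes matriz → Spec_recortes matriz (recortes matriz)

-- ===== LEMMAS AND PROOFS =====

-- any min-tracking step function, run from an already-seen minimum `a`, is the Int `min` fold
theorem pv_step_foldl (g : Option Int → Int → Option Int)
    (g2 : ∀ v x, g (some v) x = if x < v then some x else some v)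
    (xs : List Int) (a : Int) :
    xs.foldl g (some a) = some (xs.foldl min a) := by
  induction xs generalizing a with
  | nil => rfl
  | cons h t ih =>
    rw [List.foldl_cons, List.foldl_cons, g2]
    have : (if h < a then some h else some a) = some (min a h) := by
      by_cases hlt : h < a
      · rw [if_pos hlt]; congr 1; omega
      · rw [if_neg hlt]; congr 1; omega
    rw [this, ih]

theorem pv_min_foldl (t : List Int) (a b : Int) :
    min a (t.foldl min b) = t.foldl min (min a b) := by
  induction t generalizing b with
  | nil => rfl
  | cons c t ih =>
    simp only [List.foldl_cons]
    rw [ih]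
    congr 1
    omega

-- A's fold over the rows is the same fold over the list of row lengths
theorem pvA_fold (matriz : List (List Int)) :
    matriz.foldl
      (fun (lc : Option Int) (fila : List Int) =>
        match lc with
        | none => some (fila.length : Int)
        | some v => if (fila.length : Int) < v then some (fila.length : Int) else some v)
      none
    = (matriz.map (fun fila => (fila.length : Int))).foldl
        (fun (lc : Option Int) (x : Int) =>
          match lc with
          | none => some x
          | some v => if x < v then some x else some v)
        none := by
  rw [List.foldl_map]

-- the two recorte computations agree
theorem pv_recorte_eq (n : Int) (lens : List Int) :
    (match
       lens.foldl
         (fun (lc : Option Int) (x : Int) =>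
           match lc with
           | none => some x
           | some v => if x < v then some x else some v)
         none with
     | none => n
     | some v => if n < v then n else v)
    = (PySem.List.min? (n :: lens) id).getD 0 := by
  simp only [PySem.List.min?, id_eq, List.foldl_cons]
  rw [pv_step_foldl _ (fun v x => rfl)]
  cases lens with
  | nil => rfl
  | cons h t =>
    simp only [List.foldl_cons]
    rw [pv_step_foldl _ (fun v x => rfl)]
    simp only [Option.getD_some]
    have h2 : t.foldl min (min n h) = min n (t.foldl min h) := (pv_min_foldl t n h).symm
    rw [h2]
    split <;> omega

theorem pv_recorte_nonneg (matriz : List (List Int)) :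
    0 ≤ (PySem.List.min? ((matriz.length : Int) :: matriz.map (fun fila => (fila.length : Int))) id).getD 0 := by
  simp only [PySem.List.min?, id_eq, List.foldl_cons]
  rw [pv_step_foldl _ (fun v x => rfl)]
  simp only [Option.getD_some]
  have key : ∀ (xs : List (List Int)) (a : Int), 0 ≤ a →
      0 ≤ (xs.map (fun fila => (fila.length : Int))).foldl min a := by
    intro xs
    induction xs with
    | nil => intro a ha; simpa using ha
    | cons f fs ih =>
      intro a ha
      simp only [List.map_cons, List.foldl_cons]
      exact ih _ (by positivity)
  exact key matriz _ (by positivity)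

-- the inner remove loop over a prefix of the row strips exactly that prefix
theorem pv_inner_strip (p rest acc : List Int) :
    p.foldl
      (fun st columna =>
        (st.1 ++ [columna],
         if columna ∈ st.2 then (PySem.List.remove? st.2 columna).getD st.2 else st.2))
      (acc, p ++ rest)
    = (acc ++ p, rest) := by
  induction p generalizing acc with
  | nil => simp
  | cons a t ih =>
    simp only [List.foldl_cons, List.cons_append, List.mem_cons, true_or, if_true,
      PySem.List.remove?_cons_self, Option.getD_some]
    rw [ih]
    simp

theorem pv_innerA_eq (fila : List Int) (r : Int) (hr : 0 ≤ r) :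
    pvInnerA (PySem.List.slice fila none (some r)) fila
    = (fila.take r.toNat, fila.drop r.toNat) := by
  unfold pvInnerA
  rw [PySem.List.slice_to _ hr]
  have := pv_inner_strip (fila.take r.toNat) (fila.drop r.toNat) []
  simpa using this

theorem pv_outerA_eq (r : Int) (hr : 0 ≤ r) (k : Nat) (rows : List (List Int)) :
    pvOuterA r k rows
    = ((rows.take k).map (fun f => f.take r.toNat),
       (rows.take k).map (fun f => f.drop r.toNat) ++ rows.drop k) := by
  induction rows generalizing k with
  | nil => cases k <;> simp [pvOuterA]
  | cons fila rest ih =>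
    cases k with
    | zero => simp [pvOuterA]
    | succ k => simp [pvOuterA, pv_innerA_eq fila r hr, ih]

-- ===== VERDICT (by name: the statement is the Claim_ definition above) =====
theorem recortes_spec : Claim_equal_recortes := by
  intro matriz _
  show recortes matriz = recortes_alt matriz
  simp only [recortes, recortes_alt]
  rw [pvA_fold, pv_recorte_eq]
  set r : Int := (PySem.List.min? ((matriz.length : Int) :: matriz.map (fun fila => (fila.length : Int))) id).getD 0 with hr_def
  have hr : 0 ≤ r := pv_recorte_nonneg matriz
  rw [pv_outerA_eq r hr r.toNat matriz]
  rw [PySem.List.slice_to _ hr, PySem.List.slice_from _ hr]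
  have hmap : (matriz.take r.toNat).map (fun fila => PySem.List.slice fila none (some r))
      = (matriz.take r.toNat).map (fun fila => fila.take r.toNat) :=
    List.map_congr_left (fun f _ => PySem.List.slice_to _ hr)
  have hmap2 : (matriz.take r.toNat).map (fun fila => PySem.List.slice fila (some r) none)
      = (matriz.take r.toNat).map (fun fila => fila.drop r.toNat) :=
    List.map_congr_left (fun f _ => PySem.List.slice_from _ hr)
  rw [hmap, hmap2]
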